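-- pv_equiv track=rewrite | github.com/ArezouFarshi/ORACLE_BACKEND-AF01 | server.py | filter_dpp_for_user
-- ===== SOURCE A (Python) =====
-- def filter_dpp_for_user(dpp_json, user_role):
--     result = {}
--     for section, fields in dpp_json.items():
--         # Handle both Access_Tier and access_tier just in case
--         access = fields.get("Access_Tier", fields.get("access_tier", "")).lower()
--         if "public" in access:
--             result[section] = fields
--         elif user_role == "tier1" and "tier 1" in access:
--             result[section] = fields
--         elif user_role == "tier2" and ("tier 2" in access or "tier 1" in access):
--             result[section] = fields
--     return result
-- ===== SOURCE B (Python) =====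
-- LEVELS = [("public", 0), ("tier 1", 1), ("tier 2", 2)]
--
-- def filter_dpp_for_user(dpp_json, user_role):
--     # Numeric clearance lattice: each section needs a minimum clearance level,
--     # each role grants one; a section is visible iff required <= granted.
--     clearance = {"tier1": 1, "tier2": 2}.get(user_role, 0)
--     def required(fields):
--         access = fields.get("Access_Tier", fields.get("access_tier", "")).lower()
--         return min((lvl for tag, lvl in LEVELS if tag in access), default=3)
--     return {s: f for s, f in dpp_json.items() if required(f) <= clearance}
-- ===== Notes on version B (the rewrite author's own statement) =====
-- stated objective: alternative
-- what changed: Replaces A's per-role elif cascade of substring tests with a numeric clearance lattice: each section gets a required level (min level of the tags its access string mentions, default 3) and each role a granted level, and a section is kept iff required <= granted.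
import Mathlib
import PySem

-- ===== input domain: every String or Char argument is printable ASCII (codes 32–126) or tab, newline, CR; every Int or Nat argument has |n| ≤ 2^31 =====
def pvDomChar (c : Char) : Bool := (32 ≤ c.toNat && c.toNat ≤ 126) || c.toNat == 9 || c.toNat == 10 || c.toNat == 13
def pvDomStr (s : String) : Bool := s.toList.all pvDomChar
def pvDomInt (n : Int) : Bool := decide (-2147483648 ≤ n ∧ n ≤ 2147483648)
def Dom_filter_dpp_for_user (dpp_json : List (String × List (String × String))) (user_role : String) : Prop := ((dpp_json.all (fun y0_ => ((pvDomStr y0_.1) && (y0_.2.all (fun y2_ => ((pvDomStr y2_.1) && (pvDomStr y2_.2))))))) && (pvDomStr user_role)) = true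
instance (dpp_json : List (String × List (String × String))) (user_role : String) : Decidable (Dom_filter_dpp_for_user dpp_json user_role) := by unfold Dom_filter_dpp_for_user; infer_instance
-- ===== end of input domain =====

-- B replaces A's per-role elif cascade with a numeric clearance lattice: each
-- section gets a required level, each role a granted level, and a section is
-- kept iff required ≤ granted (objective: alternative).

-- ===== PORT A =====
def filter_dpp_for_user (dpp_json : List (String × List (String × String))) (user_role : String) : List (String × List (String × String)) :=
  (dpp_json.foldl (fun result p =>
    let fields : PySem.Dict String String := PySem.Dict.mk p.2
    let access := PySem.Str.lower (fields.getD "Access_Tier" (fields.getD "access_tier" ""))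
    if PySem.Str.isIn "public" access then result.insert p.1 p.2
    else if user_role == "tier1" && PySem.Str.isIn "tier 1" access then result.insert p.1 p.2
    else if user_role == "tier2" && (PySem.Str.isIn "tier 2" access || PySem.Str.isIn "tier 1" access) then result.insert p.1 p.2
    else result) PySem.Dict.empty).items

-- ===== PORT B =====
def pvLevels : List (String × Int) := [("public", 0), ("tier 1", 1), ("tier 2", 2)]

-- min((lvl for tag, lvl in LEVELS if tag in access), default=3)
def pvRequired (fields : List (String × String)) : Int :=
  let fd : PySem.Dict String String := PySem.Dict.mk fields
  let access := PySem.Str.lower (fd.getD "Access_Tier" (fd.getD "access_tier" ""))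
  match PySem.List.min? ((pvLevels.filter (fun t => PySem.Str.isIn t.1 access)).map Prod.snd) (fun x => x) with
  | none => 3
  | some v => v

def filter_dpp_for_user_alt (dpp_json : List (String × List (String × String))) (user_role : String) : List (String × List (String × String)) :=
  let clearance : Int := (PySem.Dict.mk [("tier1", (1 : Int)), ("tier2", 2)]).getD user_role 0
  dpp_json.filter (fun p => decide (pvRequired p.2 ≤ clearance))

-- ===== PRECONDITION & SPEC =====
-- dpp_json models a Python dict, whose section keys are necessarily distinct; a
-- duplicate-key association list represents no Python input, so Pre_ excludes it.
def Pre_filter_dpp_for_user (dpp_json : List (String × List (String × String))) (user_role : String) : Prop :=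
  (dpp_json.map Prod.fst).Nodup
instance (dpp_json : List (String × List (String × String))) (user_role : String) : Decidable (Pre_filter_dpp_for_user dpp_json user_role) := by unfold Pre_filter_dpp_for_user; infer_instance

def pvWitness_filter_dpp_for_user : (List (String × List (String × String))) × String :=
  ([("batch", [("Access_Tier", "Public")]), ("origin", [("access_tier", "Tier 1")])], "tier1")

def Spec_filter_dpp_for_user (dpp_json : List (String × List (String × String))) (user_role : String) (out : List (String × List (String × String))) : Prop := out = filter_dpp_for_user_alt dpp_json user_role
instance (dpp_json : List (String × List (String × String))) (user_role : String) (out : List (String × List (String × String))) : Decidable (Spec_filter_dpp_for_user dpp_json user_role out) := by unfold Spec_filter_dpp_for_user; infer_instance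

-- ===== CLAIM (what is proved, stated in full; the proofs are below) =====
def Claim_equal_filter_dpp_for_user : Prop := ∀ (dpp_json : List (String × List (String × String))) (user_role : String), Dom_filter_dpp_for_user dpp_json user_role → Pre_filter_dpp_for_user dpp_json user_role → Spec_filter_dpp_for_user dpp_json user_role (filter_dpp_for_user dpp_json user_role)

-- ===== LEMMAS AND PROOFS =====

-- B's min-over-levels computation evaluates to a three-way if-chain.
lemma req_val (access : String) :
    (match PySem.List.min? ((pvLevels.filter (fun t => PySem.Str.isIn t.1 access)).map Prod.snd) (fun x => x) with
     | none => (3 : Int)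
     | some v => v)
    = (if PySem.Str.isIn "public" access then 0
       else if PySem.Str.isIn "tier 1" access then 1
       else if PySem.Str.isIn "tier 2" access then 2 else 3) := by
  by_cases b0 : PySem.Chars.isIn ['p','u','b','l','i','c'] access.toList <;>
  by_cases b1 : PySem.Chars.isIn ['t','i','e','r',' ','1'] access.toList <;>
  by_cases b2 : PySem.Chars.isIn ['t','i','e','r',' ','2'] access.toList <;>
    simp [pvLevels, b0, b1, b2, PySem.List.min?]

-- the role's granted clearance level
lemma clr_tier1 : (PySem.Dict.mk [("tier1", (1 : Int)), ("tier2", 2)]).getD "tier1" 0 = 1 := by decide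
lemma clr_tier2 : (PySem.Dict.mk [("tier1", (1 : Int)), ("tier2", 2)]).getD "tier2" 0 = 2 := by decide
lemma clr_other (user_role : String) (h1 : user_role ≠ "tier1") (h2 : user_role ≠ "tier2") :
    (PySem.Dict.mk [("tier1", (1 : Int)), ("tier2", 2)]).getD user_role 0 = 0 := by
  simp [PySem.Dict.getD, PySem.Dict.get?, PySem.Dict.mk, List.find?,
        beq_eq_false_iff_ne.mpr (Ne.symm h1), beq_eq_false_iff_ne.mpr (Ne.symm h2)]

-- A's elif cascade keeps a section exactly when B's clearance comparison holds
-- (stated over an arbitrary access string so it applies pointwise in the fold).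
lemma step_core (user_role access : String) (r : PySem.Dict String (List (String × String)))
    (k : String) (v : List (String × String)) :
    (if PySem.Str.isIn "public" access then r.insert k v
     else if user_role == "tier1" && PySem.Str.isIn "tier 1" access then r.insert k v
     else if user_role == "tier2" && (PySem.Str.isIn "tier 2" access || PySem.Str.isIn "tier 1" access) then r.insert k v
     else r)
    = (if decide ((match PySem.List.min? ((pvLevels.filter (fun t => PySem.Str.isIn t.1 access)).map Prod.snd) (fun x => x) with
           | none => (3 : Int)
           | some w => w) ≤ (PySem.Dict.mk [("tier1", (1 : Int)), ("tier2", 2)]).getD user_role 0) = true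
       then r.insert k v else r) := by
  rw [req_val]
  by_cases h1 : user_role = "tier1"
  · subst h1; rw [clr_tier1]
    by_cases b0 : PySem.Chars.isIn ['p','u','b','l','i','c'] access.toList <;>
    by_cases b1 : PySem.Chars.isIn ['t','i','e','r',' ','1'] access.toList <;>
    by_cases b2 : PySem.Chars.isIn ['t','i','e','r',' ','2'] access.toList <;> simp [b0, b1, b2]
  · by_cases h2 : user_role = "tier2"
    · subst h2; rw [clr_tier2]
      by_cases b0 : PySem.Chars.isIn ['p','u','b','l','i','c'] access.toList <;>
      by_cases b1 : PySem.Chars.isIn ['t','i','e','r',' ','1'] access.toList <;>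
      by_cases b2 : PySem.Chars.isIn ['t','i','e','r',' ','2'] access.toList <;> simp [b0, b1, b2]
    · rw [clr_other user_role h1 h2]
      by_cases b0 : PySem.Chars.isIn ['p','u','b','l','i','c'] access.toList <;>
      by_cases b1 : PySem.Chars.isIn ['t','i','e','r',' ','1'] access.toList <;>
      by_cases b2 : PySem.Chars.isIn ['t','i','e','r',' ','2'] access.toList <;>
        simp [b0, b1, b2, beq_eq_false_iff_ne.mpr h1, beq_eq_false_iff_ne.mpr h2]

lemma fold_filter (q : String × List (String × String) → Bool) :
    ∀ (l : List (String × List (String × String)))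
      (acc : PySem.Dict String (List (String × String))),
      (∀ k ∈ l.map Prod.fst, acc.contains k = false) → (l.map Prod.fst).Nodup →
      (l.foldl (fun r x => if q x then r.insert x.1 x.2 else r) acc).items
        = acc.items ++ l.filter q := by
  intro l
  induction l with
  | nil => intro acc _ _; simp
  | cons x t ih =>
    intro acc hdisj hnd
    simp only [List.map_cons, List.nodup_cons] at hnd
    have hx : acc.contains x.1 = false := hdisj x.1 (by simp)
    simp only [List.foldl_cons, List.filter_cons]
    by_cases hq : q x = true
    · rw [if_pos hq, if_pos hq,
        ih (acc.insert x.1 x.2)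
          (by
            intro k hk
            rw [PySem.Dict.contains_insert]
            have : k ≠ x.1 := fun he => hnd.1 (he ▸ hk)
            simp [this, hdisj k (by simp [hk])])
          hnd.2,
        PySem.Dict.items_insert_of_not_contains _ _ hx]
      simp
    · rw [if_neg hq, if_neg hq, ih acc (fun k hk => hdisj k (by simp [hk])) hnd.2]

-- ===== VERDICT (by name: the statement is the Claim_ definition above) =====
theorem filter_dpp_for_user_spec : Claim_equal_filter_dpp_for_user := by
  intro dpp_json user_role _ hpre
  unfold Spec_filter_dpp_for_user filter_dpp_for_user filter_dpp_for_user_alt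
  have hstep : (fun (r : PySem.Dict String (List (String × String))) (p : String × List (String × String)) =>
      let fields : PySem.Dict String String := PySem.Dict.mk p.2
      let access := PySem.Str.lower (fields.getD "Access_Tier" (fields.getD "access_tier" ""))
      if PySem.Str.isIn "public" access then r.insert p.1 p.2
      else if user_role == "tier1" && PySem.Str.isIn "tier 1" access then r.insert p.1 p.2
      else if user_role == "tier2" && (PySem.Str.isIn "tier 2" access || PySem.Str.isIn "tier 1" access) then r.insert p.1 p.2
      else r)
      = (fun r p => if decide (pvRequired p.2 ≤ (PySem.Dict.mk [("tier1", (1 : Int)), ("tier2", 2)]).getD user_role 0) = true then r.insert p.1 p.2 else r) := by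
    funext r p
    exact step_core user_role
      (PySem.Str.lower ((PySem.Dict.mk p.2).getD "Access_Tier" ((PySem.Dict.mk p.2).getD "access_tier" ""))) r p.1 p.2
  rw [hstep, fold_filter _ dpp_json PySem.Dict.empty (by simp [PySem.Dict.contains_empty]) hpre]
  simp [PySem.Dict.empty]
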